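-- pv_equiv track=rewrite | github.com/MrBrantCode/unitest_baseline | mut_generate/mist_train_taco/taco_10021/solution.py | max_collatz_sequence_length
-- ===== SOURCE A (Python) =====
-- def collatz_length_util(n, coll_len_map):
--     if n in coll_len_map:
--         return coll_len_map[n]
--     if n == 1:
--         coll_len_map[n] = 1
--     elif n % 2 == 0:
--         coll_len_map[n] = 1 + collatz_length_util(n // 2, coll_len_map)
--     else:
--         coll_len_map[n] = 1 + collatz_length_util(3 * n + 1, coll_len_map)
--     return coll_len_map[n]
--
-- def max_collatz_sequence_length(N):
--     coll_len_map = {}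
--     max_length = 0
--
--     for i in range(1, N + 1):
--         if i not in coll_len_map:
--             collatz_length_util(i, coll_len_map)
--         current_length = coll_len_map[i]
--         if max_length < current_length:
--             max_length = current_length
--
--     return max_length
-- ===== SOURCE B (Python) =====
-- def max_collatz_sequence_length(N):
--     cache = {}
--     best = 0
--     for i in range(1, N + 1):
--         path = []
--         n = i
--         while n not in cache and n != 1:
--             path.append(n)
--             n = n // 2 if n % 2 == 0 else 3 * n + 1
--         length = 1 if n == 1 else cache[n]
--         for m in reversed(path):
--             length += 1
--             cache[m] = length
--         if length > best:
--             best = length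
--     return best
-- ===== Notes on version B (the rewrite author's own statement) =====
-- stated objective: alternative
-- what changed: Replaced the recursive memoized helper by a single iterative loop that follows each chain while collecting the visited values in an explicit path list and then assigns the cached lengths back-to-front, eliminating the recursion (and Python's recursion-depth limit) entirely.
import Mathlib
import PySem

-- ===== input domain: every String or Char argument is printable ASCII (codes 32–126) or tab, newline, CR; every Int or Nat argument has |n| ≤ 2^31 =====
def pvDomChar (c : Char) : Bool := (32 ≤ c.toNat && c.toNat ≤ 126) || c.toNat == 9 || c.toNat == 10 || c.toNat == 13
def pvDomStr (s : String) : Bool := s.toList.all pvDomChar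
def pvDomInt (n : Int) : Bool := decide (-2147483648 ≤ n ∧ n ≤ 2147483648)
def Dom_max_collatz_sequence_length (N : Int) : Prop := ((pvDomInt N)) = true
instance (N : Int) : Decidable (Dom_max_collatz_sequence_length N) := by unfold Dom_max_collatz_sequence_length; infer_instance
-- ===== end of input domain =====

-- B replaces A's recursive memoized helper by an iterative loop that collects each chain's visited
-- values in an explicit path list and assigns the cached lengths back-to-front (no recursion).

-- Fuel making both ports total in Lean: one unit per visited chain value, consumed identically by
-- both ports, so the equivalence below is unconditional; in Python neither loop/recursion is bounded.
def pvFuel : Nat := 1073741824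

-- ===== PORT A =====
-- collatz_length_util(n, coll_len_map): memoized recursion; fuel only guards totality.
def collatz_length_util (fuel : Nat) (n : Int) (m : PySem.Dict Int Int) : Int × PySem.Dict Int Int :=
  match fuel with
  | 0 => (0, m)  -- unreachable in practice (Python: unbounded recursion)
  | fuel + 1 =>
    match m.get? n with
    | some v => (v, m)
    | none =>
      let m' :=
        if n = 1 then m.insert n 1
        else if PySem.Int.mod n 2 = 0 then
          let r := collatz_length_util fuel (PySem.Int.floordiv n 2) m
          r.2.insert n (1 + r.1)
        else
          let r := collatz_length_util fuel (3 * n + 1) m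
          r.2.insert n (1 + r.1)
      (m'.getD n 0, m')

-- one iteration of A's for-loop body (state = (coll_len_map, max_length))
def pvStepA (st : PySem.Dict Int Int × Int) (i : Int) : PySem.Dict Int Int × Int :=
  let m := if st.1.contains i then st.1 else (collatz_length_util pvFuel i st.1).2
  let cur := m.getD i 0
  (m, if st.2 < cur then cur else st.2)

def max_collatz_sequence_length (N : Int) : Int :=
  ((PySem.List.pyRange 1 (N + 1) 1).foldl pvStepA (PySem.Dict.empty, 0)).2

-- ===== PORT B =====
-- the while loop: follow the chain, appending each visited value to path, until a cached value or 1
def pvWalk (fuel : Nat) (cache : PySem.Dict Int Int) (n : Int) : List Int × Option Int :=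
  match fuel with
  | 0 => ([], none)  -- unreachable in practice (Python: the while loop would still be running)
  | fuel + 1 =>
    if cache.contains n = false ∧ n ≠ 1 then
      let r := pvWalk fuel cache (if PySem.Int.mod n 2 = 0 then PySem.Int.floordiv n 2 else 3 * n + 1)
      (n :: r.1, r.2)
    else ([], some n)

-- for m in reversed(path): length += 1; cache[m] = length   (recursing to the end of path first)
def pvUnwind (path : List Int) (length : Int) (cache : PySem.Dict Int Int) : Int × PySem.Dict Int Int :=
  match path with
  | [] => (length, cache)
  | m :: rest =>
    let r := pvUnwind rest length cache
    (r.1 + 1, r.2.insert m (r.1 + 1))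

-- one iteration of B's for-loop body: walk, seed length (cache[n] is cached here, so getD is exact),
-- then unwind; the none case is the unreachable fuel exhaustion.
def pvRunB (fuel : Nat) (cache : PySem.Dict Int Int) (n : Int) : Int × PySem.Dict Int Int :=
  let w := pvWalk fuel cache n
  let len0 : Int :=
    match w.2 with
    | some m => if m = 1 then 1 else cache.getD m 0
    | none => 0
  pvUnwind w.1 len0 cache

-- one iteration of B's for-loop body (state = (cache, best))
def pvStepB (st : PySem.Dict Int Int × Int) (i : Int) : PySem.Dict Int Int × Int :=
  let r := pvRunB pvFuel st.1 i
  (r.2, if r.1 > st.2 then r.1 else st.2)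

def max_collatz_sequence_length_alt (N : Int) : Int :=
  ((PySem.List.pyRange 1 (N + 1) 1).foldl pvStepB (PySem.Dict.empty, 0)).2

-- ===== PRECONDITION & SPEC =====
def Spec_max_collatz_sequence_length (N : Int) (out : Int) : Prop := out = max_collatz_sequence_length_alt N
instance (N : Int) (out : Int) : Decidable (Spec_max_collatz_sequence_length N out) := by unfold Spec_max_collatz_sequence_length; infer_instance

-- ===== CLAIM (what is proved, stated in full; the proofs are below) =====
def Claim_equal_max_collatz_sequence_length : Prop := ∀ (N : Int), Dom_max_collatz_sequence_length N → Spec_max_collatz_sequence_length N (max_collatz_sequence_length N)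

-- ===== LEMMAS AND PROOFS =====

-- A's dict and B's cache agree everywhere except at key 1, which A caches as 1 and B never stores.
def pvRel (mA cB : PySem.Dict Int Int) : Prop :=
  (∀ k : Int, k ≠ 1 → mA.get? k = cB.get? k) ∧
  (∀ v : Int, mA.get? 1 = some v → v = 1) ∧
  cB.get? 1 = none

lemma pvWalk_succ (f : Nat) (c : PySem.Dict Int Int) (n : Int) :
    pvWalk (f + 1) c n =
      if c.contains n = false ∧ n ≠ 1 then
        let r := pvWalk f c (if PySem.Int.mod n 2 = 0 then PySem.Int.floordiv n 2 else 3 * n + 1)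
        (n :: r.1, r.2)
      else ([], some n) := rfl

lemma util_cached (f : Nat) (n : Int) (m : PySem.Dict Int Int) {v : Int}
    (hget : m.get? n = some v) : collatz_length_util (f + 1) n m = (v, m) := by
  show (match m.get? n with
    | some v => (v, m)
    | none => _) = (v, m)
  rw [hget]

lemma util_uncached (f : Nat) (n : Int) (m : PySem.Dict Int Int)
    (hget : m.get? n = none) :
    collatz_length_util (f + 1) n m =
      (let m' :=
        if n = 1 then m.insert n 1
        else if PySem.Int.mod n 2 = 0 then
          let r := collatz_length_util f (PySem.Int.floordiv n 2) m
          r.2.insert n (1 + r.1)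
        else
          let r := collatz_length_util f (3 * n + 1) m
          r.2.insert n (1 + r.1)
      (m'.getD n 0, m')) := by
  show (match m.get? n with
    | some v => (v, m)
    | none => _) = _
  rw [hget]

lemma pvRel_insert {mA cB : PySem.Dict Int Int} (h : pvRel mA cB) {n : Int} (hn : n ≠ 1) (v : Int) :
    pvRel (mA.insert n v) (cB.insert n v) := by
  obtain ⟨h1, h2, h3⟩ := h
  refine ⟨?_, ?_, ?_⟩
  · intro k hk
    rw [PySem.Dict.get?_insert, PySem.Dict.get?_insert]
    split
    · rfl
    · exact h1 k hk
  · intro w hw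
    rw [PySem.Dict.get?_insert] at hw
    split at hw
    · omega
    · exact h2 w hw
  · rw [PySem.Dict.get?_insert]
    split
    · omega
    · exact h3

lemma contains_false_of_get?_none {c : PySem.Dict Int Int} {n : Int}
    (h : c.get? n = none) : c.contains n = false := by
  have h2 := PySem.Dict.contains_eq_isSome_get? c n
  rw [h] at h2
  simpa using h2

lemma contains_true_of_get?_some {c : PySem.Dict Int Int} {n v : Int}
    (h : c.get? n = some v) : c.contains n = true := by
  have h2 := PySem.Dict.contains_eq_isSome_get? c n
  rw [h] at h2
  simpa using h2

-- the heart: on related dicts, A's recursive helper and B's walk+unwind produce the same length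
-- and leave related dicts — for EVERY fuel, so no Collatz-termination hypothesis is needed.
lemma run_eq : ∀ (f : Nat) (n : Int) (mA cB : PySem.Dict Int Int), pvRel mA cB →
    (collatz_length_util f n mA).1 = (pvRunB f cB n).1 ∧
    pvRel (collatz_length_util f n mA).2 (pvRunB f cB n).2 := by
  intro f
  induction f with
  | zero =>
    intro n mA cB h
    exact ⟨rfl, h⟩
  | succ f ih =>
    intro n mA cB h
    by_cases hn : n = 1
    · subst hn
      have hwalk : pvWalk (f + 1) cB 1 = ([], some 1) := by
        rw [pvWalk_succ]
        rw [if_neg (by simp)]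
      have hB : pvRunB (f + 1) cB 1 = (1, cB) := by
        unfold pvRunB
        rw [hwalk]
        rfl
      cases hget : mA.get? 1 with
      | some v =>
        have hv : v = 1 := h.2.1 v hget
        rw [util_cached f 1 mA hget, hB, hv]
        exact ⟨rfl, h⟩
      | none =>
        rw [util_uncached f 1 mA hget, hB]
        simp only [if_true]
        constructor
        · rw [PySem.Dict.getD_eq_get?_getD, PySem.Dict.get?_insert_self]; rfl
        · obtain ⟨h1, _, h3⟩ := h
          refine ⟨?_, ?_, h3⟩
          · intro k hk
            rw [PySem.Dict.get?_insert, if_neg (by simpa using hk)]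
            exact h1 k hk
          · intro w hw
            rw [PySem.Dict.get?_insert_self] at hw
            cases hw; rfl
    · cases hget : mA.get? n with
      | some v =>
        have hgetB : cB.get? n = some v := by rw [← h.1 n hn]; exact hget
        have hwalk : pvWalk (f + 1) cB n = ([], some n) := by
          rw [pvWalk_succ, if_neg]
          rw [contains_true_of_get?_some hgetB]
          simp
        have hB : pvRunB (f + 1) cB n = (v, cB) := by
          unfold pvRunB
          rw [hwalk]
          simp only [if_neg hn]
          rw [PySem.Dict.getD_eq_get?_getD, hgetB]
          rfl
        rw [util_cached f n mA hget, hB]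
        exact ⟨rfl, h⟩
      | none =>
        have hgetB : cB.get? n = none := by rw [← h.1 n hn]; exact hget
        have hcond : cB.contains n = false ∧ n ≠ 1 := ⟨contains_false_of_get?_none hgetB, hn⟩
        set n' := if PySem.Int.mod n 2 = 0 then PySem.Int.floordiv n 2 else 3 * n + 1 with hn'
        have hwalk : pvWalk (f + 1) cB n =
            (n :: (pvWalk f cB n').1, (pvWalk f cB n').2) := by
          rw [pvWalk_succ, if_pos hcond]
        have hB : pvRunB (f + 1) cB n =
            ((pvRunB f cB n').1 + 1, (pvRunB f cB n').2.insert n ((pvRunB f cB n').1 + 1)) := by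
          unfold pvRunB
          rw [hwalk]
          rfl
        obtain ⟨ihv, ihrel⟩ := ih n' mA cB h
        have hA : collatz_length_util (f + 1) n mA =
            ((collatz_length_util f n' mA).2.insert n (1 + (collatz_length_util f n' mA).1) |>.getD n 0,
             (collatz_length_util f n' mA).2.insert n (1 + (collatz_length_util f n' mA).1)) := by
          rw [util_uncached f n mA hget]
          by_cases hm : PySem.Int.mod n 2 = 0
          · simp only [if_neg hn, if_pos hm, hn']
          · simp only [if_neg hn, if_neg hm, hn']
        rw [hA, hB]
        constructor
        · simp only
          rw [PySem.Dict.getD_eq_get?_getD, PySem.Dict.get?_insert_self]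
          show 1 + (collatz_length_util f n' mA).1 = (pvRunB f cB n').1 + 1
          omega
        · have : (1 + (collatz_length_util f n' mA).1) = ((pvRunB f cB n').1 + 1) := by omega
          rw [this]
          exact pvRel_insert ihrel hn _

-- one loop-body step: A's branch-and-lookup equals B's walk-and-unwind, preserving pvRel
lemma body_eq (mA cB : PySem.Dict Int Int) (i : Int) (h : pvRel mA cB) :
    (if mA.contains i then mA else (collatz_length_util pvFuel i mA).2).getD i 0
      = (pvRunB pvFuel cB i).1 ∧
    pvRel (if mA.contains i then mA else (collatz_length_util pvFuel i mA).2)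
      (pvRunB pvFuel cB i).2 := by
  have hfuel : pvFuel = 1073741823 + 1 := rfl
  have hrun := run_eq pvFuel i mA cB h
  cases hget : mA.get? i with
  | some v =>
    have hc : mA.contains i = true := contains_true_of_get?_some hget
    have hA1 : collatz_length_util pvFuel i mA = (v, mA) := by
      rw [hfuel]; exact util_cached _ _ _ hget
    rw [hA1] at hrun
    simp only [hc, if_true]
    refine ⟨?_, hrun.2⟩
    rw [PySem.Dict.getD_eq_get?_getD, hget]
    exact hrun.1
  | none =>
    have hc : mA.contains i = false := contains_false_of_get?_none hget
    simp only [hc, Bool.false_eq_true, if_false]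
    refine ⟨?_, hrun.2⟩
    have hfst : (collatz_length_util pvFuel i mA).2.getD i 0 = (collatz_length_util pvFuel i mA).1 := by
      rw [hfuel, util_uncached 1073741823 i mA hget]
    rw [hfst]
    exact hrun.1

lemma fold_eq : ∀ (l : List Int) (mA cB : PySem.Dict Int Int) (acc : Int), pvRel mA cB →
    (l.foldl pvStepA (mA, acc)).2 = (l.foldl pvStepB (cB, acc)).2 := by
  intro l
  induction l with
  | nil => intro mA cB acc _; rfl
  | cons i l ih =>
    intro mA cB acc h
    obtain ⟨hv, hrel⟩ := body_eq mA cB i h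
    have hacc : (pvStepA (mA, acc) i).2 = (pvStepB (cB, acc) i).2 := by
      simp only [pvStepA, pvStepB]
      rw [hv]
    have hrel' : pvRel (pvStepA (mA, acc) i).1 (pvStepB (cB, acc) i).1 := by
      simp only [pvStepA, pvStepB]
      exact hrel
    rw [List.foldl_cons, List.foldl_cons]
    have hmain := ih (pvStepA (mA, acc) i).1 (pvStepB (cB, acc) i).1 (pvStepA (mA, acc) i).2 hrel'
    rw [Prod.mk.eta] at hmain
    rw [hacc] at hmain
    rw [Prod.mk.eta] at hmain
    exact hmain

-- ===== VERDICT (by name: the statement is the Claim_ definition above) =====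
theorem max_collatz_sequence_length_spec : Claim_equal_max_collatz_sequence_length := by
  intro N _
  unfold Spec_max_collatz_sequence_length max_collatz_sequence_length max_collatz_sequence_length_alt
  have hrel : pvRel PySem.Dict.empty PySem.Dict.empty :=
    ⟨fun k _ => rfl,
     fun v hv => by simp [PySem.Dict.get?_empty] at hv,
     by simp [PySem.Dict.get?_empty]⟩
  exact fold_eq _ PySem.Dict.empty PySem.Dict.empty 0 hrel
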